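-- pv_equiv track=rewrite | github.com/omriporat/adaptive_learning | code/utils.py | get_non_alignment_regions
-- ===== SOURCE A (Python) =====
-- def get_non_alignment_regions(s):
--     regions = []
--     pad_region = False
--     aa_start = None
--
--     for i, c in enumerate(s):
--         if c != '-':
--             if not pad_region:
--                 aa_start = i
--                 pad_region = True
--         else:
--             if pad_region:
--                 aa_end = i - 1
--                 regions.append((aa_start, aa_end))
--                 pad_region = False
--     if pad_region:
--         regions.append((aa_start, len(s) - 1))
--     # Now, format as "start_end" for first, then "xstartxend" for others
--     if not regions:
--         return ""
--     out = []
--     for idx, (st, en) in enumerate(regions):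
--             out.append(f"{st}_{en}")
--
--     return "x".join(out)
-- ===== SOURCE B (Python) =====
-- def get_non_alignment_regions(s):
--     # A run START is a non-dash character whose left neighbour (with a '-' sentinel
--     # before the string) is a dash; a run END is a non-dash character whose right
--     # neighbour (with a '-' sentinel after the string) is a dash.  Two stateless
--     # boundary filters over shifted zips, paired up positionally.
--     starts = [i for i, (p, c) in enumerate(zip('-' + s, s)) if c != '-' and p == '-']
--     ends = [i for i, (c, nx) in enumerate(zip(s, s[1:] + '-')) if c != '-' and nx == '-']
--     return "x".join(f"{a}_{b}" for a, b in zip(starts, ends))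
-- ===== Notes on version B (the rewrite author's own statement) =====
-- stated objective: alternative
-- what changed: Replaces A's stateful flag-and-bookkeeping scan with a stateless formulation: run starts are the non-dash positions with a dash left-neighbour and run ends the non-dash positions with a dash right-neighbour (sentinel '-' padding via shifted zips), the two filtered lists zipped positionally into regions.
import Mathlib
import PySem

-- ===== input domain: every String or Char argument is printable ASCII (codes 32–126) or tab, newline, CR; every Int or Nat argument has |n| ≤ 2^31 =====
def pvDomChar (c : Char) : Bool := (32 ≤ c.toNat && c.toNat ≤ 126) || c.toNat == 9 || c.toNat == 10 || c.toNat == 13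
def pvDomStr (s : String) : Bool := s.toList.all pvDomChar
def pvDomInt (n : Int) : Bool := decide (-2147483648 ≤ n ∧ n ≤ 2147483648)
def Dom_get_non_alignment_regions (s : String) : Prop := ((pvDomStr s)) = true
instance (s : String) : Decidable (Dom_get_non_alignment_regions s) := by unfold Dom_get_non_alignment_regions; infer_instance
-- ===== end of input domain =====

-- B replaces A's stateful flag scan by two stateless boundary filters (run starts =
-- non-dash with dash left-neighbour, run ends = non-dash with dash right-neighbour,
-- over sentinel-padded shifted zips) paired positionally (objective: alternative; same linear cost).


-- ===== PORT A =====
-- loop state: (regions, pad_region, aa_start); Python's initial 'aa_start = None' is the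
-- placeholder 0 here — it is never read while pad_region is false
def pvAStep (st : List (Int × Int) × Bool × Int) (ic : Int × Char) :
    List (Int × Int) × Bool × Int :=
  if ic.2 ≠ '-' then
    (if !st.2.1 then (st.1, true, ic.1) else st)
  else
    (if st.2.1 then (st.1 ++ [(st.2.2, ic.1 - 1)], false, st.2.2) else st)

-- f"{st}_{en}"
def pvFmt (p : Int × Int) : String := PySem.Int.toStr p.1 ++ "_" ++ PySem.Int.toStr p.2

def get_non_alignment_regions (s : String) : String :=
  let st := (PySem.List.enumerate s.toList 0).foldl pvAStep ([], false, (0 : Int))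
  let regions := if st.2.1 then st.1 ++ [(st.2.2, PySem.Str.len s - 1)] else st.1
  if regions = [] then ""
  else PySem.Str.join "x" (regions.map pvFmt)

-- ===== PORT B =====
-- Source B: starts = [i for i,(p,c) in enumerate(zip('-'+s, s)) if c != '-' and p == '-']
--       ends   = [i for i,(c,nx) in enumerate(zip(s, s[1:]+'-')) if c != '-' and nx == '-']
--       "x".join(f"{a}_{b}" for a,b in zip(starts, ends))
def get_non_alignment_regions_alt (s : String) : String :=
  let cs := s.toList
  let starts := ((PySem.List.enumerate (List.zip ('-' :: cs) cs) 0).filter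
      (fun p => p.2.2 != '-' && p.2.1 == '-')).map Prod.fst
  let ends := ((PySem.List.enumerate (List.zip cs (cs.drop 1 ++ ['-'])) 0).filter
      (fun p => p.2.1 != '-' && p.2.2 == '-')).map Prod.fst
  PySem.Str.join "x" ((starts.zip ends).map pvFmt)

-- ===== PRECONDITION & SPEC =====
def Spec_get_non_alignment_regions (s : String) (out : String) : Prop := out = get_non_alignment_regions_alt s
instance (s : String) (out : String) : Decidable (Spec_get_non_alignment_regions s out) := by unfold Spec_get_non_alignment_regions; infer_instance

-- ===== CLAIM (what is proved, stated in full; the proofs are below) =====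
def Claim_equal_get_non_alignment_regions : Prop := ∀ (s : String), Dom_get_non_alignment_regions s → Spec_get_non_alignment_regions s (get_non_alignment_regions s)

-- ===== LEMMAS AND PROOFS =====

-- A's final "if pad_region: append (aa_start, end)" step
def pvClose (r : List (Int × Int) × Bool × Int) (e : Int) : List (Int × Int) :=
  if r.2.1 then r.1 ++ [(r.2.2, e)] else r.1

-- A's whole region computation run on a suffix cs starting at absolute index i
def pvFinal (cs : List Char) (i : Int) (st : List (Int × Int) × Bool × Int) :
    List (Int × Int) :=
  pvClose ((PySem.List.enumerate cs i).foldl pvAStep st) (i + cs.length - 1)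

-- length of the maximal leading non-dash run
def pvRunLen : List Char → Nat
  | [] => 0
  | c :: cs => if c = '-' then 0 else pvRunLen cs + 1

-- the regions as (start, end) pairs, by leading-run decomposition
def pvPairs : List Char → Int → List (Int × Int)
  | [], _ => []
  | c :: cs, i =>
    if c = '-' then pvPairs cs (i + 1)
    else
      (i, i + 1 + (pvRunLen cs : Int) - 1) ::
        pvPairs (List.drop (pvRunLen cs) cs) (i + 1 + pvRunLen cs)
termination_by cs _ => cs.length
decreasing_by
  all_goals
    (have h1 : (List.drop (pvRunLen cs) cs).length ≤ cs.length := by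
       rw [List.length_drop]; omega
     have h2 : (c :: cs).length = cs.length + 1 := rfl
     omega)

-- B's starts list on a suffix, with the previous character as explicit state
def pvS : Char → List Char → Int → List Int
  | _, [], _ => []
  | prev, c :: cs, i =>
    if c ≠ '-' ∧ prev = '-' then i :: pvS c cs (i + 1) else pvS c cs (i + 1)

-- B's ends list on a suffix (right neighbour looked up in the tail, sentinel '-')
def pvE : List Char → Int → List Int
  | [], _ => []
  | c :: cs, i =>
    if c ≠ '-' ∧ cs.headD '-' = '-' then i :: pvE cs (i + 1) else pvE cs (i + 1)

-- unfolding lemmas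
theorem pvPairs_nil (i : Int) : pvPairs [] i = [] := by rw [pvPairs]

theorem pvPairs_dash (cs : List Char) (i : Int) :
    pvPairs ('-' :: cs) i = pvPairs cs (i + 1) := by
  rw [pvPairs.eq_def]; simp

theorem pvPairs_run (c : Char) (cs : List Char) (i : Int) (h : ¬ c = '-') :
    pvPairs (c :: cs) i =
      (i, i + 1 + (pvRunLen cs : Int) - 1) ::
        pvPairs (List.drop (pvRunLen cs) cs) (i + 1 + pvRunLen cs) := by
  rw [pvPairs.eq_def]; simp [h]

-- one-step lemmas for A's loop body
theorem pvAStep_dash_false (regions : List (Int × Int)) (a i : Int) :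
    pvAStep (regions, false, a) (i, '-') = (regions, false, a) := by
  simp [pvAStep]

theorem pvAStep_dash_true (regions : List (Int × Int)) (a i : Int) :
    pvAStep (regions, true, a) (i, '-') = (regions ++ [(a, i - 1)], false, a) := by
  simp [pvAStep]

theorem pvAStep_ch_false (regions : List (Int × Int)) (a i : Int) (c : Char) (h : ¬ c = '-') :
    pvAStep (regions, false, a) (i, c) = (regions, true, i) := by
  simp [pvAStep, h]

theorem pvAStep_ch_true (regions : List (Int × Int)) (a i : Int) (c : Char) (h : ¬ c = '-') :
    pvAStep (regions, true, a) (i, c) = (regions, true, a) := by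
  simp [pvAStep, h]

theorem pvFinal_cons (c : Char) (cs : List Char) (i : Int)
    (st : List (Int × Int) × Bool × Int) :
    pvFinal (c :: cs) i st = pvFinal cs (i + 1) (pvAStep st (i, c)) := by
  unfold pvFinal
  rw [PySem.List.enumerate_cons, List.foldl_cons]
  have h2 : i + ((c :: cs).length : Int) - 1 = i + 1 + (cs.length : Int) - 1 := by
    have h3 : (c :: cs).length = cs.length + 1 := rfl
    rw [h3]; push_cast; ring
  rw [h2]

theorem pvFinal_prefix (cs : List Char) : ∀ (i : Int) (regions : List (Int × Int))
    (p : Bool) (a : Int),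
    pvFinal cs i (regions, p, a) = regions ++ pvFinal cs i ([], p, a) := by
  induction cs with
  | nil =>
    intro i regions p a
    unfold pvFinal pvClose
    rw [PySem.List.enumerate_nil]
    cases p <;> simp
  | cons c cs ih =>
    intro i regions p a
    rw [pvFinal_cons, pvFinal_cons]
    by_cases hc : c = '-'
    · subst hc
      cases p
      · rw [pvAStep_dash_false, pvAStep_dash_false]
        exact ih (i + 1) regions false a
      · rw [pvAStep_dash_true, pvAStep_dash_true]
        rw [ih (i + 1) (regions ++ [(a, i - 1)]) false a,
            ih (i + 1) ([] ++ [(a, i - 1)]) false a]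
        simp [List.append_assoc]
    · cases p
      · rw [pvAStep_ch_false _ _ _ _ hc, pvAStep_ch_false _ _ _ _ hc]
        exact ih (i + 1) regions true i
      · rw [pvAStep_ch_true _ _ _ _ hc, pvAStep_ch_true _ _ _ _ hc]
        exact ih (i + 1) regions true a

theorem pvFinal_eq_pvPairs (cs : List Char) :
    (∀ (i a : Int), pvFinal cs i ([], false, a) = pvPairs cs i) ∧
    (∀ (i a : Int), pvFinal cs i ([], true, a) =
      (a, i + (pvRunLen cs : Int) - 1) ::
        pvPairs (List.drop (pvRunLen cs) cs) (i + pvRunLen cs)) := by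
  induction cs with
  | nil =>
    constructor <;> intro i a
    · unfold pvFinal pvClose
      rw [PySem.List.enumerate_nil]
      simp [pvPairs_nil]
    · unfold pvFinal pvClose
      rw [PySem.List.enumerate_nil]
      simp [pvRunLen, pvPairs_nil]
  | cons c cs ih =>
    constructor <;> intro i a
    · rw [pvFinal_cons]
      by_cases hc : c = '-'
      · subst hc
        rw [pvAStep_dash_false, ih.1 (i + 1) a, pvPairs_dash]
      · rw [pvAStep_ch_false _ _ _ _ hc, ih.2 (i + 1) i, pvPairs_run c cs i hc]
    · rw [pvFinal_cons]
      by_cases hc : c = '-'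
      · subst hc
        rw [pvAStep_dash_true]
        rw [pvFinal_prefix cs (i + 1) ([] ++ [(a, i - 1)]) false a, ih.1 (i + 1) a]
        have hr : pvRunLen ('-' :: cs) = 0 := by simp [pvRunLen]
        rw [hr]
        simp
        rw [pvPairs_dash]
      · rw [pvAStep_ch_true _ _ _ _ hc, ih.2 (i + 1) a]
        have hr : pvRunLen (c :: cs) = pvRunLen cs + 1 := by simp [pvRunLen, hc]
        rw [hr, List.drop_succ_cons]
        have e1 : i + ((pvRunLen cs + 1 : Nat) : Int) - 1 = i + 1 + (pvRunLen cs : Int) - 1 := by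
          push_cast; ring
        have e2 : i + ((pvRunLen cs + 1 : Nat) : Int) = i + 1 + (pvRunLen cs : Int) := by
          push_cast; ring
        rw [e1, e2]

-- unfolding lemmas for pvS / pvE
theorem pvS_pos (prev c : Char) (cs : List Char) (i : Int) (h1 : c ≠ '-') (h2 : prev = '-') :
    pvS prev (c :: cs) i = i :: pvS c cs (i + 1) := by
  rw [pvS.eq_def]; exact if_pos ⟨h1, h2⟩

theorem pvS_neg (prev c : Char) (cs : List Char) (i : Int) (h : ¬ (c ≠ '-' ∧ prev = '-')) :
    pvS prev (c :: cs) i = pvS c cs (i + 1) := by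
  rw [pvS.eq_def]; exact if_neg h

theorem pvE_pos (c : Char) (cs : List Char) (i : Int) (h1 : c ≠ '-') (h2 : cs.headD '-' = '-') :
    pvE (c :: cs) i = i :: pvE cs (i + 1) := by
  rw [pvE.eq_def]; exact if_pos ⟨h1, h2⟩

theorem pvE_neg (c : Char) (cs : List Char) (i : Int) (h : ¬ (c ≠ '-' ∧ cs.headD '-' = '-')) :
    pvE (c :: cs) i = pvE cs (i + 1) := by
  rw [pvE.eq_def]; exact if_neg h

-- the port's starts comprehension IS pvS
theorem pvS_bridge (cs : List Char) : ∀ (prev : Char) (i : Int),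
    ((PySem.List.enumerate (List.zip (prev :: cs) cs) i).filter
      (fun p => p.2.2 != '-' && p.2.1 == '-')).map Prod.fst = pvS prev cs i := by
  induction cs with
  | nil =>
    intro prev i
    simp [PySem.List.enumerate_nil, pvS]
  | cons c cs ih =>
    intro prev i
    rw [List.zip_cons_cons, PySem.List.enumerate_cons]
    by_cases h : c ≠ '-' ∧ prev = '-'
    · rw [List.filter_cons_of_pos (by rw [Bool.and_eq_true, bne_iff_ne, beq_iff_eq]; exact h),
        List.map_cons, ih c (i + 1), pvS_pos prev c cs i h.1 h.2]
    · rw [List.filter_cons_of_neg (by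
          simp only [Bool.and_eq_true, bne_iff_ne, beq_iff_eq]; exact h),
        ih c (i + 1), pvS_neg prev c cs i h]

-- the port's ends comprehension IS pvE
theorem pvE_bridge (cs : List Char) : ∀ (i : Int),
    ((PySem.List.enumerate (List.zip cs (cs.drop 1 ++ ['-'])) i).filter
      (fun p => p.2.1 != '-' && p.2.2 == '-')).map Prod.fst = pvE cs i := by
  induction cs with
  | nil =>
    intro i
    simp [PySem.List.enumerate_nil, pvE]
  | cons c cs ih =>
    intro i
    have hz : List.zip (c :: cs) ((c :: cs).drop 1 ++ ['-'])
        = (c, cs.headD '-') :: List.zip cs (cs.drop 1 ++ ['-']) := by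
      cases cs with
      | nil => simp
      | cons c2 t => simp
    rw [hz, PySem.List.enumerate_cons]
    by_cases h : c ≠ '-' ∧ cs.headD '-' = '-'
    · rw [List.filter_cons_of_pos (by rw [Bool.and_eq_true, bne_iff_ne, beq_iff_eq]; exact h),
        List.map_cons, ih (i + 1), pvE_pos c cs i h.1 h.2]
    · rw [List.filter_cons_of_neg (by
          simp only [Bool.and_eq_true, bne_iff_ne, beq_iff_eq]; exact h),
        ih (i + 1), pvE_neg c cs i h]

-- zipping B's boundary lists yields exactly the leading-run decomposition
theorem pv_zip_eq (n : Nat) : ∀ (cs : List Char), cs.length ≤ n →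
    (∀ i : Int, List.zip (pvS '-' cs i) (pvE cs i) = pvPairs cs i) ∧
    (∀ (i a : Int) (c : Char), c ≠ '-' → cs.headD '-' ≠ '-' →
      List.zip (a :: pvS c cs i) (pvE cs i) =
        (a, i + (pvRunLen cs : Int) - 1) ::
          pvPairs (List.drop (pvRunLen cs) cs) (i + pvRunLen cs)) := by
  induction n with
  | zero =>
    intro cs h
    have hnil : cs = [] := List.eq_nil_of_length_eq_zero (Nat.le_zero.mp h)
    subst hnil
    constructor
    · intro i; simp [pvS, pvE, pvPairs_nil]
    · intro i a c _ hhd; simp at hhd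
  | succ n ihn =>
    intro cs hlen
    -- the no-pending false-state reduction (previous char non-dash, current run already closed)
    have aux : ∀ (t : List Char) (c : Char) (j : Int), c ≠ '-' → t.headD '-' = '-' →
        t.length ≤ n → List.zip (pvS c t j) (pvE t j) = pvPairs t j := by
      intro t c j hc hhd ht
      cases t with
      | nil => simp [pvS, pvE, pvPairs_nil]
      | cons c2 t2 =>
        have hc2 : c2 = '-' := by simpa using hhd
        subst hc2
        rw [pvS_neg c '-' t2 j (by simp),
            pvE_neg '-' t2 j (by simp), pvPairs_dash]
        exact (ihn t2 (by simp at ht; omega)).1 (j + 1)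
    constructor
    · intro i
      cases cs with
      | nil => simp [pvS, pvE, pvPairs_nil]
      | cons c cs' =>
        have hl : cs'.length ≤ n := by simp at hlen; omega
        by_cases hc : c = '-'
        · subst hc
          rw [pvS_neg '-' '-' cs' i (by simp),
              pvE_neg '-' cs' i (by simp), pvPairs_dash]
          exact (ihn cs' hl).1 (i + 1)
        · rw [pvS_pos '-' c cs' i hc rfl, pvPairs_run c cs' i hc]
          by_cases hhd : cs'.headD '-' = '-'
          · have hr0 : pvRunLen cs' = 0 := by
              cases cs' with
              | nil => rfl
              | cons c2 t2 =>
                have : c2 = '-' := by simpa using hhd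
                simp [pvRunLen, this]
            rw [pvE_pos c cs' i hc hhd, List.zip_cons_cons,
                aux cs' c (i + 1) hc hhd hl, hr0]
            simp
          · rw [pvE_neg c cs' i (fun hx => hhd hx.2)]
            exact (ihn cs' hl).2 (i + 1) i c hc hhd
    · intro i a c hc hhd
      cases cs with
      | nil => simp at hhd
      | cons c2 cs' =>
        have hc2 : c2 ≠ '-' := by simpa using hhd
        have hl : cs'.length ≤ n := by simp at hlen; omega
        have hr : pvRunLen (c2 :: cs') = pvRunLen cs' + 1 := by simp [pvRunLen, hc2]
        rw [pvS_neg c c2 cs' i (fun hx => hc hx.2)]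
        by_cases hhd2 : cs'.headD '-' = '-'
        · have hr0 : pvRunLen cs' = 0 := by
            cases cs' with
            | nil => rfl
            | cons c3 t3 =>
              have : c3 = '-' := by simpa using hhd2
              simp [pvRunLen, this]
          rw [pvE_pos c2 cs' i hc2 hhd2, List.zip_cons_cons,
              aux cs' c2 (i + 1) hc2 hhd2 hl, hr, hr0]
          simp
        · rw [pvE_neg c2 cs' i (fun hx => hhd2 hx.2),
              (ihn cs' hl).2 (i + 1) a c2 hc2 hhd2, hr, List.drop_succ_cons]
          have e1 : i + ((pvRunLen cs' + 1 : Nat) : Int) - 1 = i + 1 + (pvRunLen cs' : Int) - 1 := by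
            push_cast; ring
          have e2 : i + ((pvRunLen cs' + 1 : Nat) : Int) = i + 1 + (pvRunLen cs' : Int) := by
            push_cast; ring
          rw [e1, e2]

-- ===== VERDICT (by name: the statement is the Claim_ definition above) =====
theorem get_non_alignment_regions_spec : Claim_equal_get_non_alignment_regions := by
  intro s _
  unfold Spec_get_non_alignment_regions
  simp only [get_non_alignment_regions, get_non_alignment_regions_alt]
  have h := (pvFinal_eq_pvPairs s.toList).1 0 0
  unfold pvFinal pvClose at h
  have hlen : (0 : Int) + (s.toList.length : Int) - 1 = PySem.Str.len s - 1 := by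
    simp [PySem.Str.len_eq]
  rw [hlen] at h
  rw [h]
  rw [pvS_bridge s.toList '-' 0, pvE_bridge s.toList 0]
  rw [(pv_zip_eq s.toList.length s.toList (Nat.le_refl _)).1 0]
  by_cases hnil : pvPairs s.toList 0 = []
  · simp [hnil, PySem.Str.join]
  · simp [hnil]
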